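-- pv_equiv track=rewrite | github.com/DanielFijolek/cryptography_tasks | mini_AES.py | text_to_bin
-- ===== SOURCE A (Python) =====
-- def str_to_bin(text, precison):
--     return ('{:0' + str(precison) + 'b}').format(int(text, 16))
--
-- def text_to_bin(text):
--     array = []
--     final_array = []
--     i = 0
--     for x in text:
--         array.append(str_to_bin(x, 4))
--         i += 1
--         if (i == 4):
--             text_str = ''
--             text_array = []
--             for j in range(4):
--                 text_str += array[j]
--             for j in text_str:
--                 text_array.append(int(j))
--             i = 0
--             array = []
--             final_array.append(text_array)
--     return final_array
-- ===== SOURCE B (Python) =====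
-- def text_to_bin(text):
--     # Flatten-then-chunk: one flat bit string, then consecutive 16-bit windows.
--     bits = ''.join(format(int(c, 16), '04b') for c in text)
--     out = []
--     while len(bits) >= 16:
--         out.append([int(b) for b in bits[:16]])
--         bits = bits[16:]
--     return out
-- ===== Notes on version B (the rewrite author's own statement) =====
-- stated objective: simpler
-- what changed: Replaces the interleaved counter-based grouping (per-char counter, temp array, rebuild string every 4th char) by a two-phase flatten-then-chunk: build one flat bit string, then slice off complete 16-bit windows.
import Mathlib
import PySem

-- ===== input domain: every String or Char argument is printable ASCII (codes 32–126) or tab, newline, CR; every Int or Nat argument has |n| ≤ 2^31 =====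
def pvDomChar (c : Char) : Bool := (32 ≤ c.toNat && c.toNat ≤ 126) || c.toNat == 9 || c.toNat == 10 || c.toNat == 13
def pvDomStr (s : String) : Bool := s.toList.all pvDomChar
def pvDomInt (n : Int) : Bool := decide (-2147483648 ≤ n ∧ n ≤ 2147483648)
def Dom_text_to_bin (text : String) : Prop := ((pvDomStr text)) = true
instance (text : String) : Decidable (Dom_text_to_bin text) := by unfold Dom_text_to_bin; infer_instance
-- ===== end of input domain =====

-- B is a two-phase flatten-then-chunk rewrite of A's interleaved counter-based grouping; objective: simpler.

-- shared helpers (both Pythons call int(c,16) and format(·,'04b')):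
-- value of a single hex digit; Python's int(c,16) raises on non-hex chars, which Pre_ excludes
-- (the 0 default is never reached inside Pre_).
def hexVal (c : Char) : Nat :=
  if '0' ≤ c ∧ c ≤ '9' then c.toNat - 48
  else if 'a' ≤ c ∧ c ≤ 'f' then c.toNat - 87
  else if 'A' ≤ c ∧ c ≤ 'F' then c.toNat - 55
  else 0

-- hand port of str_to_bin(x, 4) = '{:04b}'.format(v): exact for 0 ≤ v < 16 (all hexVal outputs)
def bits4 (v : Nat) : List Char :=
  [if v / 8 % 2 = 1 then '1' else '0',
   if v / 4 % 2 = 1 then '1' else '0',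
   if v / 2 % 2 = 1 then '1' else '0',
   if v % 2 = 1 then '1' else '0']

-- hand port of int(j) for j a character of a bit string: exact on '0'/'1', the only chars reached
def bitToInt (c : Char) : Int := if c = '1' then 1 else 0

-- ===== PORT A =====
def loopA : List Char → List (List Char) → Int → List (List Int) → List (List Int)
  | [], _, _, final_array => final_array
  | x :: xs, array, i, final_array =>
      let array' := array ++ [bits4 (hexVal x)]
      let i' := i + 1
      if i' = 4 then
        let text_str := (PySem.List.pyRange 0 4 1).foldl
          (fun s j => s ++ ((PySem.List.pyGet? array' j).getD [])) []
        let text_array := text_str.map bitToInt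
        loopA xs [] 0 (final_array ++ [text_array])
      else loopA xs array' i' final_array

def text_to_bin (text : String) : List (List Int) :=
  loopA text.toList [] 0 []

-- ===== PORT B =====
def chunkLoop (bits : List Char) (out : List (List Int)) : List (List Int) :=
  if 16 ≤ bits.length then
    chunkLoop (bits.drop 16) (out ++ [(bits.take 16).map bitToInt])
  else out
termination_by bits.length
decreasing_by simp; omega

def text_to_bin_alt (text : String) : List (List Int) :=
  chunkLoop (text.toList.flatMap (fun c => bits4 (hexVal c))) []

-- ===== PRECONDITION & SPEC =====
-- Pre_ excludes strings with a non-hex-digit character, on which both Pythons raise ValueError.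
def Pre_text_to_bin (text : String) : Prop :=
  text.toList.all (fun c => ('0' ≤ c ∧ c ≤ '9') ∨ ('a' ≤ c ∧ c ≤ 'f') ∨ ('A' ≤ c ∧ c ≤ 'F')) = true
instance (text : String) : Decidable (Pre_text_to_bin text) := by unfold Pre_text_to_bin; infer_instance
def pvWitness_text_to_bin : String := "12aB5678c"

def Spec_text_to_bin (text : String) (out : List (List Int)) : Prop := out = text_to_bin_alt text
instance (text : String) (out : List (List Int)) : Decidable (Spec_text_to_bin text out) := by unfold Spec_text_to_bin; infer_instance

-- ===== CLAIM (what is proved, stated in full; the proofs are below) =====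
def Claim_equal_text_to_bin : Prop := ∀ (text : String), Dom_text_to_bin text → Pre_text_to_bin text → Spec_text_to_bin text (text_to_bin text)

-- ===== LEMMAS AND PROOFS =====

lemma length_bits4 (v : Nat) : (bits4 v).length = 4 := by simp [bits4]

lemma chunkLoop_acc_aux : ∀ (n : Nat) (bits : List Char) (out : List (List Int)), bits.length ≤ n →
    chunkLoop bits out = out ++ chunkLoop bits [] := by
  intro n
  induction n with
  | zero =>
      intro bits out h
      rw [chunkLoop, if_neg (by omega), chunkLoop, if_neg (by omega)]; simp
  | succ n ih =>
      intro bits out h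
      by_cases h16 : 16 ≤ bits.length
      · rw [chunkLoop, if_pos h16, ih _ _ (by simp; omega)]
        conv_rhs => rw [chunkLoop, if_pos h16, ih (bits.drop 16) _ (by simp; omega)]
        simp
      · rw [chunkLoop, if_neg h16, chunkLoop, if_neg h16]; simp

lemma chunkLoop_acc (bits : List Char) (out : List (List Int)) :
    chunkLoop bits out = out ++ chunkLoop bits [] :=
  chunkLoop_acc_aux bits.length bits out le_rfl

def flatBits (l : List Char) : List Char := l.flatMap (fun c => bits4 (hexVal c))

lemma chunkLoop_block (B rest : List Char) (h16 : B.length = 16) :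
    chunkLoop (B ++ rest) [] = [B.map bitToInt] ++ chunkLoop rest [] := by
  rw [chunkLoop, if_pos (by simp [h16]), List.take_left' h16, List.drop_left' h16,
    chunkLoop_acc rest]
  simp

lemma chunkLoop_short (bits : List Char) (h : bits.length < 16) : chunkLoop bits [] = [] := by
  rw [chunkLoop, if_neg (by omega)]

lemma loopA_eq : ∀ n (l : List Char) (fin : List (List Int)), l.length ≤ n →
    loopA l [] 0 fin = fin ++ chunkLoop (flatBits l) [] := by
  intro n
  induction n with
  | zero =>
      intro l fin h
      match l, h with
      | [], _ => simp [loopA, flatBits, chunkLoop_short]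
  | succ n ih =>
      intro l fin h
      match l with
      | [] => simp [loopA, flatBits, chunkLoop_short]
      | [a] => simp [loopA, flatBits, chunkLoop_short, length_bits4]
      | [a, b] => simp [loopA, flatBits, chunkLoop_short, length_bits4]
      | [a, b, c] => simp [loopA, flatBits, chunkLoop_short, length_bits4]
      | a :: b :: c :: d :: rest =>
          have hlen : rest.length ≤ n := by simp at h; omega
          have hstep : loopA (a :: b :: c :: d :: rest) [] 0 fin
              = loopA rest [] 0 (fin ++
                  [(bits4 (hexVal a) ++ bits4 (hexVal b) ++ bits4 (hexVal c) ++ bits4 (hexVal d)).map bitToInt]) := by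
            have h4 : PySem.List.pyRange 0 4 1 = [0, 1, 2, 3] := by decide
            simp only [loopA]
            norm_num [h4, PySem.List.pyGet?, PySem.List.pyIdx?]
            simp [show (2:Int).toNat = 2 from rfl, show (3:Int).toNat = 3 from rfl]
          have hflat : flatBits (a :: b :: c :: d :: rest)
              = (bits4 (hexVal a) ++ bits4 (hexVal b) ++ bits4 (hexVal c) ++ bits4 (hexVal d)) ++ flatBits rest := by
            simp [flatBits]
          have h16 : (bits4 (hexVal a) ++ bits4 (hexVal b) ++ bits4 (hexVal c) ++ bits4 (hexVal d)).length = 16 := by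
            simp [length_bits4]
          rw [hstep, ih rest _ hlen, hflat, chunkLoop_block _ _ h16]
          simp

-- ===== VERDICT (by name: the statement is the Claim_ definition above) =====
theorem text_to_bin_spec : Claim_equal_text_to_bin := by
  intro text _ _
  unfold Spec_text_to_bin text_to_bin text_to_bin_alt
  rw [loopA_eq text.toList.length text.toList [] le_rfl]
  simp [flatBits]
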